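-- pv_equiv track=rewrite | github.com/Abjad/abjad | tags/release-1.1.1/abjad/tools/listtools/sign.py | sign
-- ===== SOURCE A (Python) =====
-- def sign(l):
--    '''Return ``1`` when all elements in *l* are positive. ::
--
--       abjad> listtools.sign([1, 2, 3])
--       1
--
--    Return ``-1`` when all elements in *l* are negative. ::
--
--       abjad> listtools.sign([-1, -2, -3])
--       -1
--
--    Return ``0`` when *l* is empty. ::
--
--       abjad> listtools.sign([ ])
--       0
--
--    Otherwise, return ``None``. ::
--
--       abjad> listtools.sign([1, 2, -3]) is None
--       True
--    '''
--
--    if len(l) == 0: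
--       return 0
--    elif all([0 < x for x in l]):
--       return 1
--    elif all([x < 0 for x in l]):
--       return -1
--    else:
--       return None
-- ===== SOURCE B (Python) =====
-- def sign(l):
--     if not l:
--         return 0
--     signs = {(x > 0) - (x < 0) for x in l}
--     if signs == {1}:
--         return 1
--     if signs == {-1}:
--         return -1
--     return None
-- ===== Notes on version B (the rewrite author's own statement) =====
-- stated objective: alternative
-- what changed: B maps each element to its per-element sign, collects those signs into a set, and decides the answer by set equality with {1} or {-1}, instead of A's two short-circuiting all(...) comparison scans.
import Mathlib
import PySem

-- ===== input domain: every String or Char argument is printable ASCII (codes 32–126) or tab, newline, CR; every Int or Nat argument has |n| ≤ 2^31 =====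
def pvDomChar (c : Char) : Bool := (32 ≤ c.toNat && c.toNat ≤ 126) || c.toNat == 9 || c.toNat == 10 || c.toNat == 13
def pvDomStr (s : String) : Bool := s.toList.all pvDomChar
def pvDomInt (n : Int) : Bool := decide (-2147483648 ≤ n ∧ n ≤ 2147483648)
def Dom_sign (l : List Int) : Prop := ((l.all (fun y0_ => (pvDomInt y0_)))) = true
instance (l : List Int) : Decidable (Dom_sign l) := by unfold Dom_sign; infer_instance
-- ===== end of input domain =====

-- B collects the per-element signs (x>0)-(x<0) into a set and compares it with {1}/{-1}, instead of A's two all(...) comparison scans; objective: alternative.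

-- ===== PORT A =====
def sign (l : List Int) : Option Int :=
  if l.length = 0 then some 0
  else if (l.map (fun x => decide (0 < x))).all id then some 1
  else if (l.map (fun x => decide (x < 0))).all id then some (-1)
  else none

-- ===== PORT B =====
-- (x > 0) - (x < 0) in Python: bools coerce to 0/1
def pySign (x : Int) : Int := (if 0 < x then 1 else 0) - (if x < 0 then 1 else 0)

def sign_alt (l : List Int) : Option Int :=
  match l with
  | [] => some 0
  | _ :: _ =>
    let signs : PySem.Set Int := PySem.Set.ofList (l.map pySign)
    if PySem.Set.equal signs (PySem.Set.ofList [1]) then some 1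
    else if PySem.Set.equal signs (PySem.Set.ofList [-1]) then some (-1)
    else none

-- ===== PRECONDITION & SPEC =====
def Spec_sign (l : List Int) (out : Option Int) : Prop := out = sign_alt l
instance (l : List Int) (out : Option Int) : Decidable (Spec_sign l out) := by unfold Spec_sign; infer_instance

-- ===== CLAIM (what is proved, stated in full; the proofs are below) =====
def Claim_equal_sign : Prop := ∀ (l : List Int), Dom_sign l → Spec_sign l (sign l)

-- ===== LEMMAS AND PROOFS =====
-- For nonempty l, the sign set equals {c} iff every element has per-element sign c.
theorem equal_singleton_iff (h : Int) (t : List Int) (c : Int) :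
    PySem.Set.equal (PySem.Set.ofList ((h :: t).map pySign)) (PySem.Set.ofList [c]) = true
      ↔ ∀ x ∈ h :: t, pySign x = c := by
  rw [PySem.Set.equal_iff]
  constructor
  · intro H x hx
    have := (H (pySign x)).1 (by
      rw [PySem.Set.mem_ofList]; exact List.mem_map_of_mem hx)
    simpa [PySem.Set.mem_ofList] using this
  · intro H y
    simp only [PySem.Set.mem_ofList, List.mem_map, List.mem_singleton]
    constructor
    · rintro ⟨x, hx, rfl⟩; exact H x hx
    · rintro rfl; exact ⟨h, List.mem_cons_self .., (H h (List.mem_cons_self ..))⟩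

theorem pySign_eq_one (x : Int) : pySign x = 1 ↔ 0 < x := by
  unfold pySign; split_ifs <;> omega

theorem pySign_eq_neg_one (x : Int) : pySign x = -1 ↔ x < 0 := by
  unfold pySign; split_ifs <;> omega

-- ===== VERDICT (by name: the statement is the Claim_ definition above) =====
theorem sign_spec : Claim_equal_sign := by
  intro l _
  unfold Spec_sign sign sign_alt
  cases l with
  | nil => rfl
  | cons h t =>
    have e1 := equal_singleton_iff h t 1
    have e2 := equal_singleton_iff h t (-1)
    have hne : ¬ ((h :: t).length = 0) := by simp
    rw [if_neg hne]
    simp only [List.all_map, List.all_eq_true, Function.comp, id, decide_eq_true_eq,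
      e1, e2, pySign_eq_one, pySign_eq_neg_one]
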